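-- pv_equiv track=rewrite | github.com/VicterVB/Phyton | Les8/Oef16.py | zoekertje
-- ===== SOURCE A (Python) =====
-- def zoekertje(tekst):
--     klinkers = "aeiouAEIOU"
--     woorden = tekst.split()
--     resultaat = []
--
--     for woord in woorden:
--         ingekort_woord = ""
--         eerste_klinker_gevonden = False
--
--         for letter in woord:
--             if letter in klinkers:
--                 if not eerste_klinker_gevonden:
--                     ingekort_woord += letter
--                     eerste_klinker_gevonden = True
--             else:
--                 ingekort_woord += letter
--
--         resultaat.append(ingekort_woord)
--
--     ingekorte_tekst = " ".join(resultaat)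
--     return ingekorte_tekst
-- ===== SOURCE B (Python) =====
-- def zoekertje(tekst):
--     klinkers = "aeiouAEIOU"
--     resultaat = []
--     for woord in tekst.split():
--         i = next((k for k, c in enumerate(woord) if c in klinkers), None)
--         if i is None:
--             resultaat.append(woord)
--         else:
--             staart = "".join(c for c in woord[i + 1:] if c not in klinkers)
--             resultaat.append(woord[:i + 1] + staart)
--     return " ".join(resultaat)
-- ===== Notes on version B (the rewrite author's own statement) =====
-- stated objective: alternative
-- what changed: Per word, the running found-first-vowel boolean scan is replaced by locating the first vowel's index, keeping the prefix up to and including it, and filtering all vowels out of the tail in a separate pass.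
import Mathlib
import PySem

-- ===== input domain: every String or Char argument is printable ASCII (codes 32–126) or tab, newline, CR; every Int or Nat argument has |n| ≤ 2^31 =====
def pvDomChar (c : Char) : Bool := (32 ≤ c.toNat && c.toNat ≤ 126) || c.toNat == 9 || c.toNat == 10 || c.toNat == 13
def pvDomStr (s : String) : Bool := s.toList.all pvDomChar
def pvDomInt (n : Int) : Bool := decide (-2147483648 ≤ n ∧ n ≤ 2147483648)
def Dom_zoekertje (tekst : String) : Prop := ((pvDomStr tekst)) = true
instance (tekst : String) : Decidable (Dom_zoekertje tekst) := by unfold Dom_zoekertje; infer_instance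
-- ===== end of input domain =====

-- B replaces A's running found-a-vowel boolean with a first-vowel-index split: prefix up to
-- and including the first vowel, plus a separate vowel-filter pass over the tail (alternative
-- decomposition, same cost).

-- ===== PORT A =====
-- 'letter in klinkers' for a single char = membership of the char in the vowel list (exact)
def zoekertje (tekst : String) : String :=
  let klinkers := "aeiouAEIOU".toList
  let woorden := PySem.Str.split₀ tekst
  let resultaat := woorden.foldl (fun res woord =>
    let st := woord.toList.foldl (fun (st : List Char × Bool) letter =>
      if klinkers.contains letter then
        if !st.2 then (st.1 ++ [letter], true) else st
      else (st.1 ++ [letter], st.2)) ([], false)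
    res ++ [String.ofList st.1]) []
  PySem.Str.join " " resultaat

-- ===== PORT B =====
def zoekertje_altWord (w : List Char) : List Char :=
  match w.findIdx? (fun c => "aeiouAEIOU".toList.contains c) with
  | none => w
  | some i => w.take (i + 1) ++ (w.drop (i + 1)).filter (fun c => !"aeiouAEIOU".toList.contains c)

def zoekertje_alt (tekst : String) : String :=
  PySem.Str.join " "
    ((PySem.Str.split₀ tekst).map (fun w => String.ofList (zoekertje_altWord w.toList)))

-- ===== PRECONDITION & SPEC =====
def Spec_zoekertje (tekst : String) (out : String) : Prop := out = zoekertje_alt tekst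
instance (tekst : String) (out : String) : Decidable (Spec_zoekertje tekst out) := by unfold Spec_zoekertje; infer_instance

-- ===== CLAIM (what is proved, stated in full; the proofs are below) =====
def Claim_equal_zoekertje : Prop := ∀ (tekst : String), Dom_zoekertje tekst → Spec_zoekertje tekst (zoekertje tekst)

-- ===== LEMMAS AND PROOFS =====

-- A's inner-loop step function, with the vowel list abstracted for the induction
def pvStepG (kl : List Char) (st : List Char × Bool) (letter : Char) : List Char × Bool :=
  if kl.contains letter then
    if !st.2 then (st.1 ++ [letter], true) else st
  else (st.1 ++ [letter], st.2)

lemma pvFoldTrueG (kl : List Char) (w acc : List Char) :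
    w.foldl (pvStepG kl) (acc, true) =
      (acc ++ w.filter (fun c => !kl.contains c), true) := by
  induction w generalizing acc with
  | nil => simp
  | cons c rest ih =>
    by_cases h : kl.contains c = true
    · have hm : c ∈ kl := by simpa using h
      simp [pvStepG, h, hm, ih, List.filter_cons]
    · have hm : c ∉ kl := by simpa using h
      simp [pvStepG, h, hm, ih, List.filter_cons]

lemma pvFoldFalseG (kl : List Char) (w acc : List Char) :
    w.foldl (pvStepG kl) (acc, false) =
      (acc ++ (match w.findIdx? (fun c => kl.contains c) with
               | none => w
               | some i => w.take (i + 1) ++ (w.drop (i + 1)).filter (fun c => !kl.contains c)),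
       ((w.findIdx? (fun c => kl.contains c)).isSome : Bool)) := by
  induction w generalizing acc with
  | nil => simp
  | cons c rest ih =>
    rw [List.foldl_cons]
    by_cases h : kl.contains c = true
    · have hm : c ∈ kl := by simpa using h
      rw [show pvStepG kl (acc, false) c = (acc ++ [c], true) from by simp [pvStepG, h, hm]]
      rw [pvFoldTrueG, List.findIdx?_cons]
      simp [h, hm]
    · have hm : c ∉ kl := by simpa using h
      rw [show pvStepG kl (acc, false) c = (acc ++ [c], false) from by simp [pvStepG, h, hm]]
      rw [ih, List.findIdx?_cons]
      rw [if_neg (show ¬ ((fun c => kl.contains c) c = true) from h)]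
      cases hf : rest.findIdx? (fun c => kl.contains c) <;> simp [hf, hm]

lemma pvWordEq (w : List Char) :
    (w.foldl (pvStepG "aeiouAEIOU".toList) ([], false)).1 = zoekertje_altWord w := by
  rw [pvFoldFalseG]
  rfl

lemma pvOuter (ws : List String) (res : List String) :
    ws.foldl (fun r w => r ++ [String.ofList (w.toList.foldl (pvStepG "aeiouAEIOU".toList) ([], false)).1]) res
      = res ++ ws.map (fun w => String.ofList (zoekertje_altWord w.toList)) := by
  induction ws generalizing res with
  | nil => simp
  | cons w rest ih => rw [List.foldl_cons, ih, pvWordEq]; simp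

-- ===== VERDICT (by name: the statement is the Claim_ definition above) =====
theorem zoekertje_spec : Claim_equal_zoekertje := by
  intro tekst _
  show zoekertje tekst = zoekertje_alt tekst
  change PySem.Str.join " "
      ((PySem.Str.split₀ tekst).foldl
        (fun res woord => res ++ [String.ofList (woord.toList.foldl (pvStepG "aeiouAEIOU".toList) ([], false)).1]) [])
    = zoekertje_alt tekst
  rw [pvOuter]
  rfl
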